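-- pv_equiv track=rewrite | github.com/wynnfarm/persona-manager-mcp | mcp_persona_server/persona_generator.py | _customize_name
-- ===== SOURCE A (Python) =====
-- from typing import Dict, List, Any, Optional, Tuple
--
-- def _customize_name(base_name: str, task_keywords: List[str], domain: str) -> str:
--     """Customize the persona name based on task requirements."""
--     if domain == "technology" and any(kw in ["ai", "machine", "learning"] for kw in task_keywords):
--         return f"AI {base_name}"
--     elif domain == "science" and any(kw in ["medical", "health", "clinical"] for kw in task_keywords):
--         return f"Medical {base_name}"
--     elif domain == "business" and any(kw in ["financial", "investment", "trading"] for kw in task_keywords):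
--         return f"Financial {base_name}"
--     elif domain == "creative" and any(kw in ["digital", "online", "web"] for kw in task_keywords):
--         return f"Digital {base_name}"
--
--     return base_name
-- ===== SOURCE B (Python) =====
-- # B: single pass over task_keywords, each keyword mapped via an inverted
-- # keyword -> (domain, prefix) table; returns on the first keyword whose
-- # mapped domain equals the given domain.
-- _KW_TABLE = {
--     "ai": ("technology", "AI"),
--     "machine": ("technology", "AI"),
--     "learning": ("technology", "AI"),
--     "medical": ("science", "Medical"),
--     "health": ("science", "Medical"),
--     "clinical": ("science", "Medical"),
--     "financial": ("business", "Financial"),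
--     "investment": ("business", "Financial"),
--     "trading": ("business", "Financial"),
--     "digital": ("creative", "Digital"),
--     "online": ("creative", "Digital"),
--     "web": ("creative", "Digital"),
-- }
--
-- def _customize_name(base_name, task_keywords, domain):
--     """Customize the persona name based on task requirements."""
--     for kw in task_keywords:
--         entry = _KW_TABLE.get(kw)
--         if entry is not None and entry[0] == domain:
--             return entry[1] + " " + base_name
--     return base_name
-- ===== Notes on version B (the rewrite author's own statement) =====
-- stated objective: alternative
-- what changed: Inverted the data: instead of selecting the domain's branch and scanning the keywords against that branch's list, B scans the task keywords once, mapping each keyword through an inverted keyword->(domain,prefix) table and returning on the first keyword whose mapped domain matches; no per-domain keyword lists or branch chain remain.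
import Mathlib
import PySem

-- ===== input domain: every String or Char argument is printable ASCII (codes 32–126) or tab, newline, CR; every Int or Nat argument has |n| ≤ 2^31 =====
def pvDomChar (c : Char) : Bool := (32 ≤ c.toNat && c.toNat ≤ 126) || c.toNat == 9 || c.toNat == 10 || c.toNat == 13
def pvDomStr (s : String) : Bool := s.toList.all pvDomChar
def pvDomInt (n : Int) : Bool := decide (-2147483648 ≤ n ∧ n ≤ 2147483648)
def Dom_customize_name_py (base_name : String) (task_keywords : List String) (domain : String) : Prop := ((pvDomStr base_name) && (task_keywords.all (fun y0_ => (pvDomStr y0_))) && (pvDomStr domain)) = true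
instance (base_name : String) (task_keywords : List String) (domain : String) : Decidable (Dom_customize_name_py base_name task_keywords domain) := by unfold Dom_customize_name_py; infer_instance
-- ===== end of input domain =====

set_option maxHeartbeats 800000


-- B inverts the data: one pass over the task keywords, each mapped through a
-- keyword -> (domain, prefix) table, returning at the first keyword whose mapped
-- domain matches (alternative decomposition; correct because the keyword sets are disjoint).

-- ===== PORT A =====
def customize_name_py (base_name : String) (task_keywords : List String) (domain : String) : String :=
  if domain == "technology" && task_keywords.any (fun kw => (["ai", "machine", "learning"] : List String).contains kw) then
    "AI " ++ base_name
  else if domain == "science" && task_keywords.any (fun kw => (["medical", "health", "clinical"] : List String).contains kw) then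
    "Medical " ++ base_name
  else if domain == "business" && task_keywords.any (fun kw => (["financial", "investment", "trading"] : List String).contains kw) then
    "Financial " ++ base_name
  else if domain == "creative" && task_keywords.any (fun kw => (["digital", "online", "web"] : List String).contains kw) then
    "Digital " ++ base_name
  else
    base_name

-- ===== PORT B =====
-- the Python module-level dict literal _KW_TABLE (distinct keys, insertion order)
def pvKwTable : PySem.Dict String (String × String) :=
  PySem.Dict.mk
    [("ai", ("technology", "AI")),
     ("machine", ("technology", "AI")),
     ("learning", ("technology", "AI")),
     ("medical", ("science", "Medical")),
     ("health", ("science", "Medical")),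
     ("clinical", ("science", "Medical")),
     ("financial", ("business", "Financial")),
     ("investment", ("business", "Financial")),
     ("trading", ("business", "Financial")),
     ("digital", ("creative", "Digital")),
     ("online", ("creative", "Digital")),
     ("web", ("creative", "Digital"))]

-- the for-loop with early return, as structural recursion over the keyword list
def pvScan (base_name domain : String) : List String → String
  | [] => base_name
  | kw :: rest =>
    match pvKwTable.get? kw with
    | some entry =>
        if entry.1 == domain then entry.2 ++ " " ++ base_name
        else pvScan base_name domain rest
    | none => pvScan base_name domain rest

def customize_name_py_alt (base_name : String) (task_keywords : List String) (domain : String) : String :=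
  pvScan base_name domain task_keywords

-- ===== PRECONDITION & SPEC =====
def Spec_customize_name_py (base_name : String) (task_keywords : List String) (domain : String) (out : String) : Prop := out = customize_name_py_alt base_name task_keywords domain
instance (base_name : String) (task_keywords : List String) (domain : String) (out : String) : Decidable (Spec_customize_name_py base_name task_keywords domain out) := by unfold Spec_customize_name_py; infer_instance

-- ===== CLAIM =====
def Claim_equal_customize_name_py : Prop := ∀ (base_name : String) (task_keywords : List String) (domain : String), Dom_customize_name_py base_name task_keywords domain → Spec_customize_name_py base_name task_keywords domain (customize_name_py base_name task_keywords domain)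

-- ===== LEMMAS AND PROOFS =====

-- the single-pass scan equals the branch-wise characterization A computes
lemma pvScan_char (b d : String) (kws : List String) :
    pvScan b d kws =
      if d = "technology" ∧ kws.any (fun kw => (["ai", "machine", "learning"] : List String).contains kw) then "AI " ++ b
      else if d = "science" ∧ kws.any (fun kw => (["medical", "health", "clinical"] : List String).contains kw) then "Medical " ++ b
      else if d = "business" ∧ kws.any (fun kw => (["financial", "investment", "trading"] : List String).contains kw) then "Financial " ++ b
      else if d = "creative" ∧ kws.any (fun kw => (["digital", "online", "web"] : List String).contains kw) then "Digital " ++ b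
      else b := by
  induction kws with
  | nil => simp [pvScan]
  | cons kw rest ih =>
    rcases h : pvKwTable.get? kw with _ | ⟨dd, p⟩
    · have hne1 : kw ≠ "ai" := fun e => absurd (e ▸ h) (by decide)
      have hne2 : kw ≠ "machine" := fun e => absurd (e ▸ h) (by decide)
      have hne3 : kw ≠ "learning" := fun e => absurd (e ▸ h) (by decide)
      have hne4 : kw ≠ "medical" := fun e => absurd (e ▸ h) (by decide)
      have hne5 : kw ≠ "health" := fun e => absurd (e ▸ h) (by decide)
      have hne6 : kw ≠ "clinical" := fun e => absurd (e ▸ h) (by decide)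
      have hne7 : kw ≠ "financial" := fun e => absurd (e ▸ h) (by decide)
      have hne8 : kw ≠ "investment" := fun e => absurd (e ▸ h) (by decide)
      have hne9 : kw ≠ "trading" := fun e => absurd (e ▸ h) (by decide)
      have hne10 : kw ≠ "digital" := fun e => absurd (e ▸ h) (by decide)
      have hne11 : kw ≠ "online" := fun e => absurd (e ▸ h) (by decide)
      have hne12 : kw ≠ "web" := fun e => absurd (e ▸ h) (by decide)
      simp [pvScan, h, ih, List.any_cons, hne1, hne2, hne3, hne4, hne5, hne6,
            hne7, hne8, hne9, hne10, hne11, hne12]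
    · have hm : (kw, (dd, p)) ∈ pvKwTable.items := PySem.Dict.mem_items_of_get?_eq_some _ h
      simp only [pvKwTable, List.mem_cons, List.not_mem_nil, or_false,
        Prod.mk.injEq] at hm
      rcases hm with ⟨rfl,rfl,rfl⟩|⟨rfl,rfl,rfl⟩|⟨rfl,rfl,rfl⟩|⟨rfl,rfl,rfl⟩|⟨rfl,rfl,rfl⟩|⟨rfl,rfl,rfl⟩|⟨rfl,rfl,rfl⟩|⟨rfl,rfl,rfl⟩|⟨rfl,rfl,rfl⟩|⟨rfl,rfl,rfl⟩|⟨rfl,rfl,rfl⟩|⟨rfl,rfl,rfl⟩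
      · by_cases hd : d = "technology"
        · subst hd; simp [pvScan, h, List.any_cons]
        · simp [pvScan, h, ih, List.any_cons, hd, beq_eq_false_iff_ne.mpr (Ne.symm hd)]
      · by_cases hd : d = "technology"
        · subst hd; simp [pvScan, h, List.any_cons]
        · simp [pvScan, h, ih, List.any_cons, hd, beq_eq_false_iff_ne.mpr (Ne.symm hd)]
      · by_cases hd : d = "technology"
        · subst hd; simp [pvScan, h, List.any_cons]
        · simp [pvScan, h, ih, List.any_cons, hd, beq_eq_false_iff_ne.mpr (Ne.symm hd)]
      · by_cases hd : d = "science"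
        · subst hd; simp [pvScan, h, List.any_cons]
        · simp [pvScan, h, ih, List.any_cons, hd, beq_eq_false_iff_ne.mpr (Ne.symm hd)]
      · by_cases hd : d = "science"
        · subst hd; simp [pvScan, h, List.any_cons]
        · simp [pvScan, h, ih, List.any_cons, hd, beq_eq_false_iff_ne.mpr (Ne.symm hd)]
      · by_cases hd : d = "science"
        · subst hd; simp [pvScan, h, List.any_cons]
        · simp [pvScan, h, ih, List.any_cons, hd, beq_eq_false_iff_ne.mpr (Ne.symm hd)]
      · by_cases hd : d = "business"
        · subst hd; simp [pvScan, h, List.any_cons]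
        · simp [pvScan, h, ih, List.any_cons, hd, beq_eq_false_iff_ne.mpr (Ne.symm hd)]
      · by_cases hd : d = "business"
        · subst hd; simp [pvScan, h, List.any_cons]
        · simp [pvScan, h, ih, List.any_cons, hd, beq_eq_false_iff_ne.mpr (Ne.symm hd)]
      · by_cases hd : d = "business"
        · subst hd; simp [pvScan, h, List.any_cons]
        · simp [pvScan, h, ih, List.any_cons, hd, beq_eq_false_iff_ne.mpr (Ne.symm hd)]
      · by_cases hd : d = "creative"
        · subst hd; simp [pvScan, h, List.any_cons]
        · simp [pvScan, h, ih, List.any_cons, hd, beq_eq_false_iff_ne.mpr (Ne.symm hd)]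
      · by_cases hd : d = "creative"
        · subst hd; simp [pvScan, h, List.any_cons]
        · simp [pvScan, h, ih, List.any_cons, hd, beq_eq_false_iff_ne.mpr (Ne.symm hd)]
      · by_cases hd : d = "creative"
        · subst hd; simp [pvScan, h, List.any_cons]
        · simp [pvScan, h, ih, List.any_cons, hd, beq_eq_false_iff_ne.mpr (Ne.symm hd)]

-- ===== VERDICT =====
theorem customize_name_py_spec : Claim_equal_customize_name_py := by
  intro base_name task_keywords domain _
  unfold Spec_customize_name_py customize_name_py customize_name_py_alt
  rw [pvScan_char]
  by_cases h1 : domain = "technology" <;> by_cases h2 : domain = "science" <;>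
    by_cases h3 : domain = "business" <;> by_cases h4 : domain = "creative" <;>
    simp_all
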